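-- pv_equiv track=rewrite | github.com/jonathanverner/alg110006 | kod/bad_sort.py | minGE
-- ===== SOURCE A (Python) =====
-- def minGE( pole, lb = None ):
--     i = 0
--     if not lb is None:
--         while( i<len(pole) and pole[i]<=lb ):
--             i = i + 1
--         if i == len(pole):
--             return None
--     min = pole[i]
--     cnt = 1
--     for j in range(i+1,len(pole)):
--         if pole[j] < min:
--             if lb is None or pole[j] > lb:
--                 cnt = 1
--                 min = pole[j]
--         elif pole[j] == min:
--             cnt = cnt + 1
--     return (min, cnt)
-- ===== SOURCE B (Python) =====
-- def minGE(pole, lb=None):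
--     if lb is None:
--         cands = pole
--     else:
--         cands = [x for x in pole if x > lb]
--         if not cands:
--             return None
--     m = min(cands)
--     return (m, cands.count(m))
-- ===== Notes on version B (the rewrite author's own statement) =====
-- stated objective: simpler
-- what changed: A's single interleaved skip-prefix/min/count pass with lb-guards inside the loop is replaced by filter-then-builtin-min-then-count over the candidate list (C-level builtins give a constant-factor speedup).
-- outside the precondition, e.g. on minGE([], None): A raises IndexError, B raises ValueError
import Mathlib
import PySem

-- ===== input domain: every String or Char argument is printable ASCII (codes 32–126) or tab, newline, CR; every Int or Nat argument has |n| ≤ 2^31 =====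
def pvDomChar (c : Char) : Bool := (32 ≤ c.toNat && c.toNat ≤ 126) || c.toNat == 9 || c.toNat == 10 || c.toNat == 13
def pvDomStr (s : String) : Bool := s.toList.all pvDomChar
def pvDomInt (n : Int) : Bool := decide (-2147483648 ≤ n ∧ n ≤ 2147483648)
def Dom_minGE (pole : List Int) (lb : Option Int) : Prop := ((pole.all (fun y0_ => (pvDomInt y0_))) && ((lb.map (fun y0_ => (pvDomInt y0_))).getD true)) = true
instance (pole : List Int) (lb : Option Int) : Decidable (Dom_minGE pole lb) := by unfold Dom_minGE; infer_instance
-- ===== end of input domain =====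

-- B replaces A's single interleaved skip-prefix/min/count pass by filter, builtin min, then count (objective: simpler).

-- ===== PORT A =====
-- the 'while i < len(pole) and pole[i] <= lb: i += 1' loop
def minGESkip (pole : List Int) (l : Int) (i : Nat) : Nat :=
  if h : i < pole.length then
    if pole[i] ≤ l then minGESkip pole l (i + 1) else i
  else i
termination_by pole.length - i

-- body of 'for j in range(i+1, len(pole))', state (min, cnt)
def minGEStep (lb : Option Int) (s : Int × Int) (x : Int) : Int × Int :=
  if x < s.1 then
    (if (match lb with | none => true | some l => decide (l < x)) = true then (x, 1) else s)
  else if x = s.1 then (s.1, s.2 + 1) else s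

def minGE (pole : List Int) (lb : Option Int) : Option (Int × Int) :=
  let i : Nat := match lb with | none => 0 | some l => minGESkip pole l 0
  if (match lb with | none => false | some _ => i == pole.length) = true then none
  else
    match PySem.List.pyGet? pole (i : Int) with
    | none => none   -- IndexError: outside Pre_minGE
    | some m0 => some ((pole.drop (i + 1)).foldl (minGEStep lb) (m0, 1))

-- ===== PORT B =====
def minGE_alt (pole : List Int) (lb : Option Int) : Option (Int × Int) :=
  match lb with
  | none =>
    match PySem.List.min? pole (fun x => x) with
    | none => none   -- ValueError: outside Pre_minGE
    | some m => some (m, (PySem.List.count pole m : Int))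
  | some l =>
    let cands := pole.filter (fun x => decide (l < x))
    if cands = [] then none
    else
      match PySem.List.min? cands (fun x => x) with
      | none => none
      | some m => some (m, (PySem.List.count cands m : Int))

-- ===== PRECONDITION & SPEC =====
-- Pre_ excludes only pole = [] with lb = None, where A raises IndexError (and B ValueError).
def Pre_minGE (pole : List Int) (lb : Option Int) : Prop := lb = none → pole ≠ []
instance (pole : List Int) (lb : Option Int) : Decidable (Pre_minGE pole lb) := by unfold Pre_minGE; infer_instance
def pvWitness_minGE : List Int × Option Int := ([3, 1, 3], none)

def Spec_minGE (pole : List Int) (lb : Option Int) (out : Option (Int × Int)) : Prop := out = minGE_alt pole lb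
instance (pole : List Int) (lb : Option Int) (out : Option (Int × Int)) : Decidable (Spec_minGE pole lb out) := by unfold Spec_minGE; infer_instance

-- ===== CLAIM (what is proved, stated in full; the proofs are below) =====
def Claim_equal_minGE : Prop := ∀ (pole : List Int) (lb : Option Int), Dom_minGE pole lb → Pre_minGE pole lb → Spec_minGE pole lb (minGE pole lb)

-- ===== LEMMAS AND PROOFS =====

-- The loop with lb = None computes the running (min, count-of-min) over xs.
theorem minGEStep_none_foldl (xs : List Int) (m c : Int) :
    xs.foldl (minGEStep none) (m, c) =
      (xs.foldl min m,
       (if xs.foldl min m = m then c else 0) + (xs.count (xs.foldl min m) : Int)) := by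
  induction xs generalizing m c with
  | nil => simp
  | cons x xs ih =>
    rcases lt_trichotomy x m with h | h | h
    · have hs : minGEStep none (m, c) x = (x, 1) := by simp [minGEStep, h]
      have hmin : min m x = x := min_eq_right h.le
      rw [List.foldl_cons, hs, ih]
      have hfold : (x :: xs).foldl min m = xs.foldl min x := by
        rw [List.foldl_cons, hmin]
      rw [hfold]
      have hMle : xs.foldl min x ≤ x := (PySem.List.foldl_min_le xs x).1
      have hMm : xs.foldl min x ≠ m := by omega
      rw [List.count_cons]
      simp only [hMm, if_false]
      by_cases hx : xs.foldl min x = x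
      · simp [hx]; omega
      · have : ¬ (x == xs.foldl min x) = true := by simpa using fun e => hx e.symm
        simp [hx, this]
    · have hs : minGEStep none (m, c) x = (m, c + 1) := by
        simp [minGEStep, h]
      have hmin : min m x = m := by omega
      rw [List.foldl_cons, hs, ih]
      have hfold : (x :: xs).foldl min m = xs.foldl min m := by
        rw [List.foldl_cons, hmin]
      rw [hfold]
      have hMle : xs.foldl min m ≤ m := (PySem.List.foldl_min_le xs m).1
      rw [List.count_cons]
      by_cases hx : xs.foldl min m = m
      · simp [h.symm]; omega
      · have : ¬ (x == xs.foldl min m) = true := by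
          simp only [beq_iff_eq]; omega
        simp [hx, this]
    · have hs : minGEStep none (m, c) x = (m, c) := by
        have h1 : ¬ x < m := by omega
        have h2 : ¬ x = m := by omega
        simp [minGEStep, h1, h2]
      have hmin : min m x = m := by omega
      rw [List.foldl_cons, hs, ih]
      have hfold : (x :: xs).foldl min m = xs.foldl min m := by
        rw [List.foldl_cons, hmin]
      rw [hfold]
      have hMle : xs.foldl min m ≤ m := (PySem.List.foldl_min_le xs m).1
      rw [List.count_cons]
      have : ¬ (x == xs.foldl min m) = true := by
        simp only [beq_iff_eq]; omega
      simp [this]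

-- The loop with lb = some l ignores elements ≤ l as long as the running min is > l.
theorem minGEStep_some_foldl (l : Int) (xs : List Int) (m c : Int) (hm : l < m) :
    xs.foldl (minGEStep (some l)) (m, c) =
      (xs.filter (fun x => decide (l < x))).foldl (minGEStep none) (m, c) := by
  induction xs generalizing m c with
  | nil => rfl
  | cons x xs ih =>
    by_cases hx : l < x
    · have hs : minGEStep (some l) (m, c) x = minGEStep none (m, c) x := by
        simp [minGEStep, hx]
      have hinv : l < (minGEStep none (m, c) x).1 := by
        simp only [minGEStep]
        split_ifs <;> simp <;> omega
      rw [List.foldl_cons, hs]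
      have := ih (minGEStep none (m, c) x).1 (minGEStep none (m, c) x).2
      rw [List.filter_cons_of_pos (by simpa using hx), List.foldl_cons]
      simpa using this hinv
    · have hlt : x < m := by omega
      have hs : minGEStep (some l) (m, c) x = (m, c) := by
        simp [minGEStep, hlt, hx]
      rw [List.foldl_cons, hs, List.filter_cons_of_neg (by simpa using hx)]
      exact ih m c hm

-- skip scans forward exactly over the prefix of elements ≤ l
theorem minGESkip_drop (pole : List Int) (l : Int) (i : Nat) (hi : i ≤ pole.length) :
    i ≤ minGESkip pole l i ∧ minGESkip pole l i ≤ pole.length ∧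
      pole.drop (minGESkip pole l i) = (pole.drop i).dropWhile (fun x => decide (x ≤ l)) := by
  suffices H : ∀ n i, i ≤ pole.length → pole.length - i ≤ n →
      i ≤ minGESkip pole l i ∧ minGESkip pole l i ≤ pole.length ∧
      pole.drop (minGESkip pole l i) = (pole.drop i).dropWhile (fun x => decide (x ≤ l)) by
    exact H (pole.length - i) i hi le_rfl
  intro n
  induction n with
  | zero =>
    intro i hi hn
    have : i = pole.length := by omega
    subst this
    rw [minGESkip]
    simp
  | succ n ih =>
    intro i hi hn
    rw [minGESkip]
    by_cases h : i < pole.length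
    · have hdrop : pole.drop i = pole[i] :: pole.drop (i + 1) :=
        List.drop_eq_getElem_cons h
      by_cases h2 : pole[i] ≤ l
      · simp only [h, dif_pos, h2, if_pos]
        have := ih (i + 1) (by omega) (by omega)
        refine ⟨by omega, this.2.1, ?_⟩
        rw [this.2.2, hdrop, List.dropWhile_cons_of_pos (by simpa using h2)]
      · simp only [h, dif_pos, h2, if_neg, not_false_iff]
        refine ⟨le_rfl, by omega, ?_⟩
        rw [hdrop, List.dropWhile_cons_of_neg (by simpa using h2), ← hdrop]
    · simp only [h, dif_neg, not_false_iff]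
      have : i = pole.length := by omega
      subst this
      simp

-- both programs' common core: the scan from (head, 1) over the tail is (min, total count of the min)
theorem minGE_loop_cons (x : Int) (t : List Int) :
    t.foldl (minGEStep none) (x, 1) = (t.foldl min x, ((x :: t).count (t.foldl min x) : Int)) := by
  rw [minGEStep_none_foldl]
  have hMle : t.foldl min x ≤ x := (PySem.List.foldl_min_le t x).1
  rw [List.count_cons]
  by_cases hx : t.foldl min x = x
  · simp [hx]; omega
  · have : ¬ (x == t.foldl min x) = true := by
      simp only [beq_iff_eq]; omega
    simp [hx, this]

-- ===== VERDICT (by name: the statement is the Claim_ definition above) =====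
theorem minGE_spec : Claim_equal_minGE := by
  intro pole lb _ hpre
  unfold Spec_minGE
  cases lb with
  | none =>
    obtain ⟨p, t, rfl⟩ := List.exists_cons_of_ne_nil (hpre rfl)
    have hA : minGE (p :: t) none = some (t.foldl (minGEStep none) (p, 1)) := by
      simp [minGE, PySem.List.pyGet?, PySem.List.pyIdx?]
    have hB : minGE_alt (p :: t) none
        = some (t.foldl min p, (((p :: t).count (t.foldl min p)) : Int)) := by
      simp [minGE_alt, PySem.List.min?_id_cons, PySem.List.count_eq]
    rw [hA, hB, minGE_loop_cons]
  | some l =>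
    obtain ⟨hj0, hlen, hdrop⟩ := minGESkip_drop pole l 0 (Nat.zero_le _)
    set j := minGESkip pole l 0 with hj
    simp only [List.drop_zero] at hdrop
    have hfilter : pole.filter (fun x => decide (l < x))
        = (pole.dropWhile (fun x => decide (x ≤ l))).filter (fun x => decide (l < x)) := by
      conv_lhs => rw [← List.takeWhile_append_dropWhile (p := fun x => decide (x ≤ l)) (l := pole)]
      rw [List.filter_append]
      have h0 : (pole.takeWhile (fun x => decide (x ≤ l))).filter (fun x => decide (l < x)) = [] := by
        rw [List.filter_eq_nil_iff]
        intro a ha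
        have := List.mem_takeWhile_imp ha
        simp only [decide_eq_true_eq] at this ⊢
        omega
      rw [h0, List.nil_append]
    by_cases hjl : j = pole.length
    · have hA : minGE pole (some l) = none := by
        simp [minGE, ← hj, hjl]
      have hnil : pole.dropWhile (fun x => decide (x ≤ l)) = [] := by
        rw [← hdrop, hjl, List.drop_length]
      have hB : minGE_alt pole (some l) = none := by
        simp [minGE_alt, hfilter, hnil]
      rw [hA, hB]
    · have hjlt : j < pole.length := by omega
      have hdropj : pole.drop j = pole[j] :: pole.drop (j + 1) := List.drop_eq_getElem_cons hjlt
      have hdw : pole.dropWhile (fun x => decide (x ≤ l)) = pole[j] :: pole.drop (j + 1) := by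
        rw [← hdrop, hdropj]
      have hhead : l < pole[j] := by
        have hne : pole.dropWhile (fun x => decide (x ≤ l)) ≠ [] := by
          rw [hdw]; exact List.cons_ne_nil _ _
        have := List.head_dropWhile_not (fun x => decide (x ≤ l)) hne
        have hh : (pole.dropWhile (fun x => decide (x ≤ l))).head hne = pole[j] := by
          simp [hdw]
        rw [hh] at this
        simp only [decide_eq_false_iff_not] at this
        omega
      have hcands : pole.filter (fun x => decide (l < x))
          = pole[j] :: (pole.drop (j + 1)).filter (fun x => decide (l < x)) := by
        rw [hfilter, hdw, List.filter_cons_of_pos (by simpa using hhead)]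
      have hA : minGE pole (some l)
          = some ((pole.drop (j + 1)).foldl (minGEStep (some l)) (pole[j], 1)) := by
        simp only [minGE, ← hj]
        rw [if_neg (by simpa using hjl)]
        rw [PySem.List.pyGet?_natCast pole j, List.getElem?_eq_getElem hjlt]
      have hB : minGE_alt pole (some l)
          = some ((((pole.drop (j + 1)).filter (fun x => decide (l < x))).foldl min pole[j]),
              (((pole.filter (fun x => decide (l < x))).count
                (((pole.drop (j + 1)).filter (fun x => decide (l < x))).foldl min pole[j])) : Int)) := by
        simp only [minGE_alt, hcands]
        rw [if_neg (List.cons_ne_nil _ _), PySem.List.min?_id_cons]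
        simp [PySem.List.count_eq]
      rw [hA, hB, minGEStep_some_foldl l _ _ _ hhead, minGE_loop_cons, hcands]
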